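-- pv_equiv track=rewrite | github.com/JacobFunnel/advent_of_code | 2022/day15.2.py | simplify_range
-- ===== SOURCE A (Python) =====
-- def simplify_range(x_range):
--     try:
--         a, b = x_range[1:3]
--         if b == a + 1:
--             x_range = simplify_range(x_range[0:1] + x_range[3:])
--     except ValueError:
--         pass
--     return x_range
-- ===== SOURCE B (Python) =====
-- def simplify_range(x_range):
--     # Single left-to-right scan: find how far the chain of consecutive
--     # leading pairs extends, then build the result once (no recursion,
--     # no repeated list re-allocation).
--     k = 1
--     n = len(x_range)
--     while k + 1 < n and x_range[k + 1] == x_range[k] + 1: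
--         k += 2
--     return x_range[0:1] + x_range[k:]
-- ===== Notes on version B (the rewrite author's own statement) =====
-- stated objective: alternative
-- what changed: Replaced the recursion that rebuilds the list on every step with a single index scan that finds the end of the chain of consecutive pairs and slices once.
import Mathlib
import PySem

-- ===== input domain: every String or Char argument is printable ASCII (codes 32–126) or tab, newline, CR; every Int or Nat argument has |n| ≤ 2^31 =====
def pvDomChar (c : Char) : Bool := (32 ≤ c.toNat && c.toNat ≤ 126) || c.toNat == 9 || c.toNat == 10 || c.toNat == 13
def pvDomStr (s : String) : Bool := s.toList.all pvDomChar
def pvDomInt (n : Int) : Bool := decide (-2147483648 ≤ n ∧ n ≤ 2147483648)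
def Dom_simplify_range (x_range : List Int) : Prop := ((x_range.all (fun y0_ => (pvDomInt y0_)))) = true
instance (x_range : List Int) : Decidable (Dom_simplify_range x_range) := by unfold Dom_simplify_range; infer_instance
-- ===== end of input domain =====

-- B replaces A's recursive list rebuilding with one index scan and a single final slice (alternative algorithm).
-- ===== PORT A =====
-- a, b = x_range[1:3] unpacks exactly when the slice has length 2 (otherwise ValueError, caught → x_range returned unchanged).
def simplify_range (x_range : List Int) : List Int :=
  match hs : PySem.List.slice x_range (some 1) (some 3) with
  | [a, b] =>
    if b = a + 1 then
      simplify_range (PySem.List.slice x_range (some 0) (some 1) ++ PySem.List.slice x_range (some 3) none)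
    else x_range
  | _ => x_range
termination_by x_range.length
decreasing_by
  have h3 : 3 ≤ x_range.length := by
    have := congrArg List.length hs
    simp [PySem.List.length_slice, PySem.List.clampIdx] at this
    omega
  have e1 : PySem.List.slice x_range (some 0) (some 1) = x_range.take 1 := by
    rw [PySem.List.slice_toNat] <;> simp
  have e2 : PySem.List.slice x_range (some 3) none = x_range.drop 3 := by
    rw [PySem.List.slice_from] <;> simp
  rw [e1, e2]
  simp [List.length_take, List.length_drop]
  omega

-- ===== PORT B =====
-- the while loop of Source B: advance k by 2 while x[k+1] == x[k] + 1 (in-range Python indexing = getElem)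
def simplifyAltScan (x : List Int) (k : Nat) : Nat :=
  if h : k + 1 < x.length then
    if x[k + 1] = x[k]'(by omega) + 1 then simplifyAltScan x (k + 2) else k
  else k
termination_by x.length - k

-- x_range[0:1] = take 1, x_range[k:] = drop k (k a nonnegative index): exact for these slices
def simplify_range_alt (x_range : List Int) : List Int :=
  x_range.take 1 ++ x_range.drop (simplifyAltScan x_range 1)

-- ===== PRECONDITION & SPEC =====
def Spec_simplify_range (x_range : List Int) (out : List Int) : Prop := out = simplify_range_alt x_range
instance (x_range : List Int) (out : List Int) : Decidable (Spec_simplify_range x_range out) := by unfold Spec_simplify_range; infer_instance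

-- ===== CLAIM (what is proved, stated in full; the proofs are below) =====
def Claim_equal_simplify_range : Prop := ∀ (x_range : List Int), Dom_simplify_range x_range → Spec_simplify_range x_range (simplify_range x_range)

-- ===== LEMMAS AND PROOFS =====

theorem slice13_cons (p q r : Int) (rest : List Int) :
    PySem.List.slice (p :: q :: r :: rest) (some 1) (some 3) = [q, r] := by
  rw [PySem.List.slice_toNat] <;> simp

theorem slice_decomp (x : List Int) :
    PySem.List.slice x (some 0) (some 1) ++ PySem.List.slice x (some 3) none = x.take 1 ++ x.drop 3 := by
  have e1 : PySem.List.slice x (some 0) (some 1) = x.take 1 := by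
    rw [PySem.List.slice_toNat] <;> simp
  have e2 : PySem.List.slice x (some 3) none = x.drop 3 := by
    rw [PySem.List.slice_from] <;> simp
  rw [e1, e2]

-- A's unfolding on a list of length ≥ 3
theorem sr_long (p q r : Int) (rest : List Int) :
    simplify_range (p :: q :: r :: rest) =
      if r = q + 1 then simplify_range (p :: rest) else p :: q :: r :: rest := by
  rw [simplify_range]
  split
  · rename_i a b hs
    rw [slice13_cons] at hs
    injection hs with h1 hs; injection hs with h2 _
    subst h1; subst h2
    rw [slice_decomp]
    simp
  · rename_i h
    exact absurd (slice13_cons p q r rest) (by intro he; exact h q r he)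

-- A's unfolding on a short list: the tuple unpack raises ValueError, caught → unchanged
theorem sr_short (x : List Int) (hx : x.length < 3) : simplify_range x = x := by
  rw [simplify_range]
  split
  · rename_i a b hs
    have := congrArg List.length hs
    simp [PySem.List.length_slice, PySem.List.clampIdx] at this
    omega
  · rfl

theorem scan_ge (x : List Int) (k : Nat) : k ≤ simplifyAltScan x k := by
  induction k using simplifyAltScan.induct (x := x) with
  | case1 k h hb ih => rw [simplifyAltScan, dif_pos h, if_pos hb]; omega
  | case2 k h hb => rw [simplifyAltScan, dif_pos h, if_neg hb]
  | case3 k h => rw [simplifyAltScan, dif_neg h]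

-- shifting the scan past the removed consecutive pair (q, r)
theorem scan_shift (p q r : Int) (rest : List Int) :
    ∀ n k, 1 ≤ k → (p :: rest).length - k ≤ n →
      simplifyAltScan (p :: rest) k + 2 = simplifyAltScan (p :: q :: r :: rest) (k + 2) := by
  intro n
  induction n with
  | zero =>
    intro k hk hn
    simp [List.length_cons] at hn
    conv_lhs => rw [simplifyAltScan]
    conv_rhs => rw [simplifyAltScan]
    rw [dif_neg (by simp [List.length_cons]; omega), dif_neg (by simp [List.length_cons]; omega)]
  | succ n ih =>
    intro k hk hn
    by_cases h1 : k + 1 < (p :: rest).length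
    · have h2 : (k + 2) + 1 < (p :: q :: r :: rest).length := by
        simp [List.length_cons] at h1 ⊢; omega
      obtain ⟨m, rfl⟩ : ∃ m, k = m + 1 := ⟨k - 1, by omega⟩
      have e1 : (p :: rest)[m + 1 + 1]'h1 = (p :: q :: r :: rest)[m + 1 + 2 + 1]'h2 := by
        simp
      have e0 : (p :: rest)[m + 1]'(by omega) = (p :: q :: r :: rest)[m + 1 + 2]'(by omega) := by
        simp
      conv_lhs => rw [simplifyAltScan]
      conv_rhs => rw [simplifyAltScan]
      rw [dif_pos h1, dif_pos h2, e1, e0]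
      by_cases hc : (p :: q :: r :: rest)[m + 1 + 2 + 1]'h2 = (p :: q :: r :: rest)[m + 1 + 2]'(by omega) + 1
      · rw [if_pos hc, if_pos hc]
        have := ih (m + 1 + 2) (by omega) (by simp [List.length_cons] at hn ⊢; omega)
        simpa using this
      · rw [if_neg hc, if_neg hc]
    · conv_lhs => rw [simplifyAltScan]
      conv_rhs => rw [simplifyAltScan]
      rw [dif_neg h1, dif_neg (by simp [List.length_cons] at h1 ⊢; omega)]

theorem main_eq (x : List Int) : simplify_range x = simplify_range_alt x := by
  suffices H : ∀ n (y : List Int), y.length ≤ n → simplify_range y = simplify_range_alt y from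
    H x.length x le_rfl
  intro n
  induction n with
  | zero =>
    intro y hy
    have : y = [] := List.eq_nil_of_length_eq_zero (by omega)
    subst this
    rw [sr_short _ (by simp), simplify_range_alt, simplifyAltScan]
    simp
  | succ n ih =>
    intro y hy
    match y with
    | [] =>
      rw [sr_short _ (by simp), simplify_range_alt, simplifyAltScan]
      simp
    | [p] =>
      rw [sr_short _ (by simp), simplify_range_alt, simplifyAltScan]
      simp
    | [p, q] =>
      rw [sr_short _ (by simp), simplify_range_alt, simplifyAltScan]
      simp
    | p :: q :: r :: rest =>
      rw [sr_long]
      by_cases hc : r = q + 1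
      · rw [if_pos hc, ih (p :: rest) (by simp [List.length_cons] at hy ⊢; omega)]
        unfold simplify_range_alt
        have hg : (1:Nat) + 1 < (p :: q :: r :: rest).length := by simp [List.length_cons]
        have hcond : (p :: q :: r :: rest)[1 + 1]'hg = (p :: q :: r :: rest)[1]'(by omega) + 1 := by
          simpa using hc
        have hstep : simplifyAltScan (p :: q :: r :: rest) 1 = simplifyAltScan (p :: q :: r :: rest) (1 + 2) := by
          conv_lhs => rw [simplifyAltScan]
          rw [dif_pos hg, if_pos hcond]
        have hshift := scan_shift p q r rest (rest.length + 1) 1 (by omega) (by simp [List.length_cons])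
        obtain ⟨m, hm⟩ : ∃ m, simplifyAltScan (p :: rest) 1 = m + 1 :=
          ⟨simplifyAltScan (p :: rest) 1 - 1, by have := scan_ge (p :: rest) 1; omega⟩
        rw [hm] at hshift
        rw [hm, hstep, ← hshift]
        rw [show m + 1 + 2 = ((m + 1) + 1) + 1 from rfl]
        simp [List.drop_succ_cons]
      · rw [if_neg hc]
        unfold simplify_range_alt
        have hg : (1:Nat) + 1 < (p :: q :: r :: rest).length := by simp [List.length_cons]
        have hcond : ¬ (p :: q :: r :: rest)[1 + 1]'hg = (p :: q :: r :: rest)[1]'(by omega) + 1 := by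
          simpa using hc
        conv_rhs => rw [simplifyAltScan]
        rw [dif_pos hg, if_neg hcond]
        simp

-- ===== VERDICT (by name: the statement is the Claim_ definition above) =====
theorem simplify_range_spec : Claim_equal_simplify_range := by
  intro x _
  unfold Spec_simplify_range
  exact main_eq x
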